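-- pv_equiv track=rewrite | github.com/KarolinaPSouza/dataset-pesquisa | 1636-Coin_Combinations_II/11495911.py | solve
-- ===== SOURCE A (Python) =====
-- M = 10**9 + 7
--
-- def solve(n, x, C):
--     dp = [0]*(x+1)
--     dp[0] = 1
--
--     for i in range(n):
--         for j in range(C[i], x + 1):
--             dp[j] += dp[j - C[i]]
--             dp[j] %= M
--
--     return dp[x]%M
-- ===== SOURCE B (Python) =====
-- M = 10**9 + 7
--
-- def solve(n, x, C):
--     ways = [1] + [0] * x            # ways[j] with no coins used yet
--     for i in range(n):
--         c = C[i]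
--         new = [0] * (x + 1)
--         for r in range(min(c, x + 1)):
--             s = 0
--             for j in range(r, x + 1, c):   # walk the residue class r mod c
--                 s = (s + ways[j]) % M      # running sum of old counts = new count
--                 new[j] = s
--         ways = new
--     return ways[x] % M
-- ===== Notes on version B (the rewrite author's own statement) =====
-- stated objective: alternative
-- what changed: Replaces A's single dp array updated in place (inner sweep reading its own fresh entries dp[j-c]) by a per-coin fresh row filled by walking each residue class r, r+c, r+2c, ... with a running sum of the previous row.
-- outside the precondition, e.g. on solve(1, 0, [0]): A returns 2, B returns 0; on solve(1, 2, [-1]): A raises IndexError, B returns 0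
import Mathlib
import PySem

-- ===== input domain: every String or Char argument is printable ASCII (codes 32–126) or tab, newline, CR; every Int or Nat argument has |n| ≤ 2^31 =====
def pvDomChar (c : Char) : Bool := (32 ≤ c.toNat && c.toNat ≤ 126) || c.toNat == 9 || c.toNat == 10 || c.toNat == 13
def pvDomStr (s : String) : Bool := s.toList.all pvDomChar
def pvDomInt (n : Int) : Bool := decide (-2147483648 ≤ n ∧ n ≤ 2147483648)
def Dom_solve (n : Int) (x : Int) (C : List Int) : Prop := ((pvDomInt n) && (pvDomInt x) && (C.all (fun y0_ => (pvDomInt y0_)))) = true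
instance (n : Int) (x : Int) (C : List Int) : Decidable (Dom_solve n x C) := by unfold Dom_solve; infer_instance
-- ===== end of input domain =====

-- B replaces A's in-place single-array sweep (which reads its own partially updated entries) by a
-- fresh row per coin, filled along each residue class modulo the coin with a running sum of the old
-- row; same return value, no argument mutation.

def pvM : Int := 1000000007

-- ===== PORT A =====
-- literal port of A: dp = [0]*(x+1); dp[0] = 1; nested loops mutating dp in place; return dp[x] % M.
-- pvF is the inner-loop body ('dp[j] += dp[j - C[i]]; dp[j] %= M'), pvG the outer-loop body.
-- '%' with the positive modulus M is Int.emod exactly (Python % agrees with emod for a positive divisor);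
-- the Python list dp is an Array, and every index used (j, j - C[i], 0, x) is nonnegative and in range
-- under Pre_ (exact there; Pre_ excludes the raising inputs), so '.toNat' never clamps on admitted inputs.
def pvF (c : Int) (dp : Array Int) (j : Int) : Array Int :=
  dp.setIfInBounds j.toNat ((dp.getD j.toNat 0 + dp.getD (j - c).toNat 0).emod pvM)

def pvG (x : Int) (C : List Int) (dp : Array Int) (i : Int) : Array Int :=
  (PySem.List.pyRange (PySem.List.pyGetD C i 0) (x + 1) 1).foldl (pvF (PySem.List.pyGetD C i 0)) dp

def solve (n : Int) (x : Int) (C : List Int) : Int :=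
  let dp0 : Array Int := Array.replicate (x + 1).toNat 0
  let dp1 := dp0.setIfInBounds 0 1
  let dp := (PySem.List.pyRange 0 n 1).foldl (pvG x C) dp1
  (dp.getD x.toNat 0).emod pvM

-- ===== PORT B =====
-- port of B: per coin, a fresh row 'new' is filled by walking each residue class r, r+c, r+2c, ...
-- with a running sum s of the old row (pvH = body of the j-loop, pvR = the j-loop, pvO = one coin).
-- All indices used (j, x, 0) are nonnegative and in range under Pre_, so '.toNat' never clamps there.
def pvH (ways : Array Int) (st : Int × Array Int) (j : Int) : Int × Array Int :=
  let s := (st.1 + ways.getD j.toNat 0).emod pvM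
  (s, st.2.setIfInBounds j.toNat s)

def pvR (x c : Int) (ways : Array Int) (new : Array Int) (r : Int) : Array Int :=
  ((PySem.List.pyRange r (x + 1) c).foldl (pvH ways) (0, new)).2

def pvO (x : Int) (C : List Int) (ways : Array Int) (i : Int) : Array Int :=
  let c := PySem.List.pyGetD C i 0
  (PySem.List.pyRange 0 (min c (x + 1)) 1).foldl (pvR x c ways) (Array.replicate (x + 1).toNat 0)

def solve_alt (n : Int) (x : Int) (C : List Int) : Int :=
  let ways0 : Array Int := (1 :: List.replicate x.toNat 0).toArray
  let ways := (PySem.List.pyRange 0 n 1).foldl (pvO x C) ways0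
  (ways.getD x.toNat 0).emod pvM

-- ===== PRECONDITION & SPEC =====
-- Pre_ excludes inputs where A raises (x < 0: 'dp[0] = 1' on an empty list; n > len(C): C[i] out of
-- range; a negative coin among the first n: 'dp[j - C[i]]' always runs past the end), and the inputs
-- with a 0 among the first n coins: the combination count is not well defined with a zero coin, and
-- A's doubled count and B's zero are both accidents of their loop bounds there.
def Pre_solve (n : Int) (x : Int) (C : List Int) : Prop :=
  n ≤ (C.length : Int) ∧ 0 ≤ x ∧ ∀ c ∈ C.take n.toNat, 0 < c
instance (n : Int) (x : Int) (C : List Int) : Decidable (Pre_solve n x C) := by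
  unfold Pre_solve; infer_instance
def pvWitness_solve : Int × Int × List Int := (2, 5, [1, 3])

def Spec_solve (n : Int) (x : Int) (C : List Int) (out : Int) : Prop := out = solve_alt n x C
instance (n : Int) (x : Int) (C : List Int) (out : Int) : Decidable (Spec_solve n x C out) := by unfold Spec_solve; infer_instance

-- ===== CLAIM (what is proved, stated in full; the proofs are below) =====
def Claim_equal_solve : Prop := ∀ (n : Int) (x : Int) (C : List Int), Dom_solve n x C → Pre_solve n x C → Spec_solve n x C (solve n x C)

-- ===== LEMMAS AND PROOFS =====

-- bcount is frec with the usable coin prefix made explicit as a (reversed) list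
def bcount : List Int → Int → Int
  | [], rem => if rem = 0 then 1 else 0
  | c :: rest, rem =>
      (PySem.List.pyRange 0 (PySem.Int.floordiv rem c + 1) 1).foldl
        (fun s k => (s + bcount rest (rem - k * c)).emod pvM) 0
termination_by l _ => l.length


theorem getD_setIfInBounds (a : Array Int) (i j : Nat) (v d : Int) (hj : j < a.size) :
    (a.setIfInBounds i v).getD j d = if j = i then v else a.getD j d := by
  rw [Array.getD_eq_getD_getElem?, Array.getD_eq_getD_getElem?, Array.getElem?_setIfInBounds]
  by_cases h : j = i
  · rw [if_pos h.symm, if_pos (h ▸ hj), if_pos h]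
    rfl
  · rw [if_neg (fun he => h he.symm), if_neg h]

theorem emod_small (a b : Int) (h0 : 0 ≤ a) (h : a < b) : a.emod b = a :=
  Int.emod_eq_of_lt h0 h

theorem emod_add_left (a b : Int) : ((a.emod pvM) + b).emod pvM = (a + b).emod pvM := by
  show (a % pvM + b) % pvM = (a + b) % pvM
  rw [Int.add_emod, Int.emod_emod_of_dvd a dvd_rfl, ← Int.add_emod]

theorem emod_add_right (a b : Int) : (a + b.emod pvM).emod pvM = (a + b).emod pvM := by
  show (a + b % pvM) % pvM = (a + b) % pvM
  rw [Int.add_emod, Int.emod_emod_of_dvd b dvd_rfl, ← Int.add_emod]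

theorem foldl_modadd (g : Int → Int) : ∀ (L : List Int) (a : Int),
    L.foldl (fun s k => (s + g k).emod pvM) (a.emod pvM) = (a + (L.map g).sum).emod pvM := by
  intro L
  induction L with
  | nil => intro a; simp
  | cons k L ih =>
    intro a
    simp only [List.foldl_cons, emod_add_left]
    rw [ih (a + g k)]
    simp [add_assoc]

theorem bcount_sum (c : Int) (l : List Int) (rem : Int) :
    bcount (c :: l) rem =
      (((PySem.List.pyRange 0 (PySem.Int.floordiv rem c + 1) 1).map
        (fun k => bcount l (rem - k * c))).sum).emod pvM := by
  rw [bcount]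
  have h0 : (0 : Int) = (0 : Int).emod pvM := by decide
  rw [h0, foldl_modadd]
  simp

theorem bcount_bounds (l : List Int) (rem : Int) : 0 ≤ bcount l rem ∧ bcount l rem < pvM := by
  cases l with
  | nil =>
    rw [bcount]
    split <;> exact ⟨by norm_num, by norm_num [pvM]⟩
  | cons c rest =>
    rw [bcount_sum]
    exact ⟨Int.emod_nonneg _ (by norm_num [pvM]), Int.emod_lt_of_pos _ (by norm_num [pvM])⟩

theorem bcount_lt (c : Int) (l : List Int) (rem : Int) (hc : 0 < c) (h0 : 0 ≤ rem) (hr : rem < c) :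
    bcount (c :: l) rem = bcount l rem := by
  rw [bcount_sum]
  have hdiv : PySem.Int.floordiv rem c = 0 := by
    rw [PySem.Int.floordiv_eq_ediv_of_pos hc]
    exact Int.ediv_eq_zero_of_lt h0 hr
  rw [hdiv]
  rw [show (0:Int) + 1 = 0 + 1 from rfl, PySem.List.pyRange_one_singleton]
  simp only [List.map_cons, List.map_nil, List.sum_cons, List.sum_nil]
  have hb := bcount_bounds l rem
  rw [show rem - 0 * c = rem by ring]
  rw [add_zero]
  exact Int.emod_eq_of_lt hb.1 hb.2

theorem bcount_ge (c : Int) (l : List Int) (rem : Int) (hc : 0 < c) (hr : c ≤ rem) :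
    bcount (c :: l) rem = (bcount l rem + bcount (c :: l) (rem - c)).emod pvM := by
  have hfd : PySem.Int.floordiv rem c = rem / c := PySem.Int.floordiv_eq_ediv_of_pos hc
  have hfd' : PySem.Int.floordiv (rem - c) c = rem / c - 1 := by
    rw [PySem.Int.floordiv_eq_ediv_of_pos hc]
    have : rem - c = rem + (-1) * c := by ring
    rw [this, Int.add_mul_ediv_right _ _ (by omega : c ≠ 0)]
    ring
  have hq1 : 1 ≤ rem / c := by
    rw [Int.le_ediv_iff_mul_le hc]; omega
  rw [bcount_sum, bcount_sum, hfd, hfd']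
  -- split off k = 0
  rw [PySem.List.pyRange_one_append 0 1 (rem / c + 1) (by omega) (by omega)]
  rw [List.map_append, List.sum_append]
  rw [show PySem.List.pyRange (0:Int) 1 1 = [(0:Int)] from rfl]
  simp only [List.map_cons, List.map_nil, List.sum_cons, List.sum_nil, add_zero]
  rw [show rem - 0 * c = rem by ring]
  -- reindex the tail sum
  have hre : ((PySem.List.pyRange 1 (rem / c + 1) 1).map (fun k => bcount l (rem - k * c))).sum
      = ((PySem.List.pyRange 0 (rem / c - 1 + 1) 1).map (fun k => bcount l (rem - c - k * c))).sum := by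
    rw [PySem.List.pyRange_one, PySem.List.pyRange_one]
    rw [List.map_map, List.map_map]
    rw [show (rem / c + 1 - 1).toNat = (rem / c - 1 + 1 - 0).toNat by omega]
    congr 1
    apply List.map_congr_left
    intro k _
    simp only [Function.comp_apply]
    congr 1
    ring
  rw [hre]
  rw [emod_add_right]

theorem inner_fold (c x : Int) (l : List Int) (hc : 0 < c) :
    ∀ (k : Nat) (dp : Array Int), (dp.size : Int) = x + 1 →
      (∀ jn : Nat, jn < dp.size → dp.getD jn 0 = bcount l (jn : Int)) →
      c + (k : Int) ≤ x + 1 →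
      (((PySem.List.pyRange c (c + k) 1).foldl (pvF c) dp).size = dp.size) ∧
      ∀ jn : Nat, jn < dp.size →
        ((PySem.List.pyRange c (c + k) 1).foldl (pvF c) dp).getD jn 0 =
          if (jn : Int) < c + k then bcount (c :: l) (jn : Int) else bcount l (jn : Int) := by
  intro k
  induction k with
  | zero =>
    intro dp hlen hdp _
    rw [show c + ((0:Nat):Int) = c by omega, PySem.List.pyRange_one_eq_nil (le_refl c)]
    refine ⟨rfl, ?_⟩
    intro jn hjn
    simp only [List.foldl_nil]
    rw [hdp jn hjn]
    split
    · rename_i hlt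
      rw [bcount_lt c l _ hc (by positivity) (by omega)]
    · rfl
  | succ k ih =>
    intro dp hlen hdp hk
    have hk' : c + (k : Int) ≤ x + 1 := by push_cast at hk ⊢; omega
    obtain ⟨ihlen, ihval⟩ := ih dp hlen hdp hk'
    have hsplit : PySem.List.pyRange c (c + ((k:Nat)+1 : Nat)) 1
        = PySem.List.pyRange c (c + (k:Int)) 1 ++ [c + (k:Int)] := by
      rw [show (c + ((k:Nat)+1 : Nat) : Int) = (c + (k:Int)) + 1 by push_cast; ring]
      exact PySem.List.pyRange_one_succ_right (by omega)
    rw [hsplit, List.foldl_append]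
    set dpP := (PySem.List.pyRange c (c + (k:Int)) 1).foldl (pvF c) dp with hdpP
    set j : Int := c + (k : Int) with hj
    have hjnn : 0 ≤ j := by omega
    have hjlt : j < x + 1 := by push_cast at hk; omega
    have hjcast : ((j.toNat : Nat) : Int) = j := Int.toNat_of_nonneg hjnn
    have hjlen : j.toNat < dp.size := by omega
    have hklen : (k : Nat) < dp.size := by push_cast at hk; omega
    -- value read at j
    have hvj : dpP.getD j.toNat 0 = bcount l j := by
      rw [ihval j.toNat hjlen, hjcast, if_neg (by omega)]
    have hvjc : dpP.getD (j - c).toNat 0 = bcount (c :: l) (j - c) := by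
      rw [show (j - c).toNat = (k : Nat) by omega, ihval k hklen,
        if_pos (by omega), show ((k : Nat) : Int) = j - c by omega]
    have hnew : (dpP.getD j.toNat 0 + dpP.getD (j - c).toNat 0).emod pvM
        = bcount (c :: l) j := by
      rw [hvj, hvjc, ← bcount_ge c l j hc (by omega)]
    simp only [List.foldl_cons, List.foldl_nil]
    rw [pvF]
    constructor
    · rw [Array.size_setIfInBounds, ihlen]
    · intro jn hjn
      rw [hnew, getD_setIfInBounds dpP j.toNat jn _ _ (by omega)]
      by_cases hje : jn = j.toNat
      · subst hje
        rw [if_pos rfl, if_pos (by omega), hjcast]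
      · rw [if_neg hje]
        rw [ihval jn hjn]
        have : ((jn : Int) < c + (k:Int)) ↔ ((jn:Int) < c + (((k:Nat)+1:Nat) : Int)) := by
          constructor
          · intro h; push_cast; omega
          · intro h; push_cast at h
            have hne : (jn : Int) ≠ j := by
              intro he; apply hje; omega
            omega
        split
        · rw [if_pos (by push_cast; omega)]
        · rename_i hnlt
          rw [if_neg (by push_cast at hnlt ⊢; omega)]

theorem outer_fold (x : Int) (C : List Int) (n : Int)
    (hn : n ≤ (C.length : Int)) (hpos : ∀ c ∈ C.take n.toNat, 0 < c) :
    ∀ (m : Nat) (dp : Array Int), (m : Int) ≤ n → (dp.size : Int) = x + 1 →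
      (∀ jn : Nat, jn < dp.size → dp.getD jn 0 = bcount [] (jn : Int)) →
      (((PySem.List.pyRange 0 (m : Int) 1).foldl (pvG x C) dp).size = dp.size) ∧
      ∀ jn : Nat, jn < dp.size →
        ((PySem.List.pyRange 0 (m : Int) 1).foldl (pvG x C) dp).getD jn 0 =
          bcount ((C.take m).reverse) (jn : Int) := by
  intro m
  induction m with
  | zero =>
    intro dp hm hlen hdp
    rw [show ((0:Nat):Int) = 0 by rfl, PySem.List.pyRange_one_eq_nil (le_refl 0)]
    exact ⟨rfl, fun jn hjn => by simpa using hdp jn hjn⟩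
  | succ m ih =>
    intro dp hm hlen hdp
    have hm' : (m : Int) ≤ n := by push_cast at hm; omega
    have hmlen : m < C.length := by push_cast at hm; omega
    obtain ⟨ihlen, ihval⟩ := ih dp hm' hlen hdp
    have hsplit : PySem.List.pyRange 0 ((m+1 : Nat) : Int) 1
        = PySem.List.pyRange 0 (m : Int) 1 ++ [(m : Int)] := by
      rw [show ((m+1 : Nat) : Int) = (m : Int) + 1 by push_cast; ring]
      exact PySem.List.pyRange_one_succ_right (by positivity)
    rw [hsplit, List.foldl_append]
    set dpP := (PySem.List.pyRange 0 (m : Int) 1).foldl (pvG x C) dp with hdpP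
    simp only [List.foldl_cons, List.foldl_nil]
    rw [pvG]
    have hcget : PySem.List.pyGetD C (m : Int) 0 = C[m] := by
      rw [PySem.List.pyGetD_natCast, List.getD_eq_getElem C 0 hmlen]
    have hcmem : C[m] ∈ C.take n.toNat := by
      have hmn : m < n.toNat := by omega
      have : (C.take n.toNat)[m]'(by simpa [List.length_take] using lt_min hmn hmlen) = C[m] :=
        List.getElem_take
      rw [← this]
      exact List.getElem_mem _
    have hcpos : 0 < C[m] := hpos _ hcmem
    have htake : (C.take (m+1)).reverse = C[m] :: (C.take m).reverse := by
      rw [List.take_add_one, List.getElem?_eq_getElem hmlen]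
      simp
    rw [hcget, htake]
    have hx1 : (0:Int) ≤ x + 1 := by omega
    by_cases hcx : C[m] ≤ x + 1
    · have hkdef : C[m] + (((x + 1 - C[m]).toNat : Nat) : Int) = x + 1 := by omega
      obtain ⟨flen, fval⟩ := inner_fold C[m] x ((C.take m).reverse) hcpos (x + 1 - C[m]).toNat dpP
        (by rw [ihlen]; exact hlen)
        (by intro jn hjn; rw [ihval jn (by omega)]) (by omega)
      rw [hkdef] at flen fval
      refine ⟨by rw [flen, ihlen], ?_⟩
      intro jn hjn
      rw [fval jn (by omega), if_pos (by omega)]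
    · rw [PySem.List.pyRange_one_eq_nil (by omega)]
      simp only [List.foldl_nil]
      refine ⟨ihlen, ?_⟩
      intro jn hjn
      rw [ihval jn hjn, bcount_lt _ _ _ hcpos (by positivity) (by omega)]

theorem chain_fold (x c r : Int) (l : List Int) (ways : Array Int) (hc : 0 < c)
    (hr0 : 0 ≤ r) (hrc : r < c)
    (hwsize : (ways.size : Int) = x + 1)
    (hw : ∀ jn : Nat, jn < ways.size → ways.getD jn 0 = bcount l (jn : Int)) :
    ∀ (m : Nat) (new : Array Int), r + c * ((m : Int) - 1) ≤ x → new.size = ways.size →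
      ((((List.range m).map (fun k : Nat => r + c * (k : Int))).foldl (pvH ways) (0, new)).2.size = new.size) ∧
      ((((List.range m).map (fun k : Nat => r + c * (k : Int))).foldl (pvH ways) (0, new)).1 =
        if m = 0 then 0 else bcount (c :: l) (r + c * ((m : Int) - 1))) ∧
      ∀ jn : Nat, jn < new.size →
        (((List.range m).map (fun k : Nat => r + c * (k : Int))).foldl (pvH ways) (0, new)).2.getD jn 0 =
          if (jn : Int).emod c = r ∧ (jn : Int) < r + c * (m : Int) then bcount (c :: l) (jn : Int)
          else new.getD jn 0 := by
  intro m
  induction m with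
  | zero =>
    intro new _ _
    refine ⟨rfl, by simp, ?_⟩
    intro jn hjn
    simp only [List.range_zero, List.map_nil, List.foldl_nil]
    rw [if_neg ?_]
    rintro ⟨h1, h2⟩
    rw [show c * ((0:Nat):Int) = 0 by push_cast; ring, add_zero] at h2
    rw [emod_small ((jn : Nat) : Int) c (by positivity) (by omega)] at h1
    omega
  | succ m ih =>
    intro new hmx hsize
    have hcast : ((m + 1 : Nat) : Int) - 1 = (m : Int) := by push_cast; ring
    rw [hcast] at hmx
    have hmx' : r + c * ((m : Int) - 1) ≤ x := by nlinarith [hc]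
    obtain ⟨ihsize, ihs, ihval⟩ := ih new hmx' hsize
    set j : Int := r + c * (m : Int) with hjdef
    rw [List.range_succ, List.map_append, List.foldl_append]
    simp only [List.map_cons, List.map_nil, List.foldl_cons, List.foldl_nil]
    set res := ((List.range m).map (fun k : Nat => r + c * (k : Int))).foldl (pvH ways) ((0 : Int), new) with hres
    have hj0 : (0:Int) ≤ j := by positivity
    have hjtoNat : ((j.toNat : Nat) : Int) = j := Int.toNat_of_nonneg hj0
    have hjsize : j.toNat < ways.size := by omega
    have hwj : ways.getD j.toNat 0 = bcount l j := by rw [hw j.toNat hjsize, hjtoNat]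
    have hjmod : j.emod c = r := by
      show j % c = r
      rw [hjdef, mul_comm c ((m:Int)), Int.add_mul_emod_self_right,
        Int.emod_eq_of_lt hr0 hrc]
    have hs' : (res.1 + ways.getD j.toNat 0).emod pvM = bcount (c :: l) j := by
      rw [ihs, hwj]
      by_cases hm0 : m = 0
      · subst hm0
        rw [if_pos rfl, zero_add]
        have hjr : j = r := by rw [hjdef]; push_cast; ring
        rw [hjr, bcount_lt c l r hc hr0 hrc]
        have hb := bcount_bounds l r
        exact Int.emod_eq_of_lt hb.1 hb.2
      · rw [if_neg hm0]
        have h1 : r + c * ((m : Int) - 1) = j - c := by rw [hjdef]; ring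
        have hcj : c ≤ j := by
          have hm1 : (1:Int) ≤ (m:Int) := by exact_mod_cast Nat.one_le_iff_ne_zero.mpr hm0
          nlinarith [hc]
        rw [h1, add_comm, ← bcount_ge c l j hc hcj]
    simp only [pvH]
    refine ⟨by rw [Array.size_setIfInBounds]; exact ihsize, ?_, ?_⟩
    · rw [hs', hcast, if_neg (Nat.succ_ne_zero m), ← hjdef]
    · intro jn hjn
      rw [hs', getD_setIfInBounds res.2 j.toNat jn _ _ (by omega)]
      have hccast : c * ((m + 1 : Nat) : Int) = c * (m : Int) + c := by push_cast; ring
      by_cases hje : jn = j.toNat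
      · subst hje
        rw [if_pos rfl, if_pos ⟨by rw [hjtoNat, hjmod], by rw [hjtoNat, hccast]; omega⟩, hjtoNat]
      · rw [if_neg hje, ihval jn hjn]
        by_cases hcond : (jn : Int).emod c = r ∧ (jn : Int) < r + c * (m : Int)
        · rw [if_pos hcond, if_pos ⟨hcond.1, by rw [hccast]; omega⟩]
        · rw [if_neg hcond, if_neg ?_]
          rintro ⟨h1, h2⟩
          rw [hccast] at h2
          apply hcond
          refine ⟨h1, ?_⟩
          by_contra hge
          push Not at hge
          have h1' : ((jn : Int)) % c = r := h1
          have hjmod' : j % c = r := hjmod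
          have hdvd : c ∣ ((jn : Int) - j) := by
            apply Int.dvd_of_emod_eq_zero
            rw [← Int.emod_eq_emod_iff_emod_sub_eq_zero, h1', hjmod']
          have : (jn : Int) - j = 0 := Int.eq_zero_of_abs_lt_dvd hdvd (by
            rw [abs_lt]; constructor <;> omega)
          exact hje (by omega)

theorem row_fold (x c : Int) (l : List Int) (ways : Array Int) (hc : 0 < c) (_hx : 0 ≤ x)
    (hwsize : (ways.size : Int) = x + 1)
    (hw : ∀ jn : Nat, jn < ways.size → ways.getD jn 0 = bcount l (jn : Int)) :
    ∀ (ρ : Nat) (new : Array Int), (ρ : Int) ≤ min c (x + 1) → new.size = ways.size →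
      (∀ jn : Nat, jn < new.size →
        new.getD jn 0 = if (jn : Int).emod c < (ρ : Int) then bcount (c :: l) (jn : Int) else 0) →
      (((PySem.List.pyRange (ρ : Int) (min c (x + 1)) 1).foldl (pvR x c ways) new).size = new.size) ∧
      ∀ jn : Nat, jn < new.size →
        ((PySem.List.pyRange (ρ : Int) (min c (x + 1)) 1).foldl (pvR x c ways) new).getD jn 0 =
          if (jn : Int).emod c < min c (x + 1) then bcount (c :: l) (jn : Int) else 0 := by
  suffices h : ∀ (d : Nat) (ρ : Nat) (new : Array Int), (min c (x + 1) - (ρ : Int)).toNat = d →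
      (ρ : Int) ≤ min c (x + 1) → new.size = ways.size →
      (∀ jn : Nat, jn < new.size →
        new.getD jn 0 = if (jn : Int).emod c < (ρ : Int) then bcount (c :: l) (jn : Int) else 0) →
      (((PySem.List.pyRange (ρ : Int) (min c (x + 1)) 1).foldl (pvR x c ways) new).size = new.size) ∧
      ∀ jn : Nat, jn < new.size →
        ((PySem.List.pyRange (ρ : Int) (min c (x + 1)) 1).foldl (pvR x c ways) new).getD jn 0 =
          if (jn : Int).emod c < min c (x + 1) then bcount (c :: l) (jn : Int) else 0 by
    intro ρ new hρ hsz hv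
    exact h _ ρ new rfl hρ hsz hv
  intro d
  induction d with
  | zero =>
    intro ρ new hd hρ hsz hv
    rw [PySem.List.pyRange_one_eq_nil (by omega)]
    simp only [List.foldl_nil]
    refine ⟨trivial, ?_⟩
    intro jn hjn
    rw [hv jn hjn, show min c (x + 1) = ((ρ : Nat) : Int) by omega]
  | succ d ihd =>
    intro ρ new hd hρ hsz hv
    have hlt : ((ρ : Nat) : Int) < min c (x + 1) := by omega
    have hrc : ((ρ : Nat) : Int) < c := lt_of_lt_of_le hlt (min_le_left _ _)
    have hrx : ((ρ : Nat) : Int) < x + 1 := lt_of_lt_of_le hlt (min_le_right _ _)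
    have hr0 : (0 : Int) ≤ ((ρ : Nat) : Int) := by positivity
    rw [PySem.List.pyRange_one_cons hlt]
    simp only [List.foldl_cons]
    -- the chain walked by pvR at residue ρ
    have hqsplit := Int.mul_ediv_add_emod (x + 1 - (ρ : Int) + c - 1) c
    have hqe0 := Int.emod_nonneg (x + 1 - (ρ : Int) + c - 1) (by omega : c ≠ 0)
    have hqel := Int.emod_lt_of_pos (x + 1 - (ρ : Int) + c - 1) hc
    have hq1 : 1 ≤ (x + 1 - (ρ : Int) + c - 1) / c := by
      rw [Int.le_ediv_iff_mul_le hc]; omega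
    set K : Nat := ((x + 1 - (ρ : Int) + c - 1) / c).toNat with hK
    have hKcast : ((K : Nat) : Int) = (x + 1 - (ρ : Int) + c - 1) / c :=
      Int.toNat_of_nonneg (by omega)
    have hbound : (ρ : Int) + c * ((K : Int) - 1) ≤ x := by
      rw [hKcast]
      have h2 : c * ((x + 1 - (ρ : Int) + c - 1) / c) ≤ x + 1 - (ρ : Int) + c - 1 := by omega
      nlinarith
    have hcover : ∀ jn : Nat, jn < new.size → ((jn : Nat) : Int) < (ρ : Int) + c * (K : Int) := by
      intro jn hjn
      have h2 : x + 1 - (ρ : Int) + c - 1 - c < c * ((x + 1 - (ρ : Int) + c - 1) / c) := by omega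
      have h3 : ((jn : Nat) : Int) ≤ x := by omega
      rw [hKcast]
      nlinarith
    obtain ⟨csize, -, cval⟩ :=
      chain_fold x c (ρ : Int) l ways hc hr0 hrc hwsize hw K new hbound hsz
    have hpvR_def : pvR x c ways new ((ρ : Nat) : Int) =
        (((List.range K).map (fun k : Nat => ((ρ : Nat) : Int) + c * (k : Int))).foldl
          (pvH ways) (0, new)).2 := by
      rw [pvR, PySem.List.pyRange_of_pos _ _ hc, if_pos hrx]
    have hsz' : (pvR x c ways new ((ρ : Nat) : Int)).size = ways.size := by
      rw [hpvR_def, csize, hsz]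
    have hv' : ∀ jn : Nat, jn < (pvR x c ways new ((ρ : Nat) : Int)).size →
        (pvR x c ways new ((ρ : Nat) : Int)).getD jn 0 =
          if (jn : Int).emod c < ((ρ : Nat) : Int) + 1 then bcount (c :: l) (jn : Int) else 0 := by
      intro jn hjn
      have hjn' : jn < new.size := by omega
      rw [hpvR_def, cval jn hjn']
      have hjmlt : (jn : Int).emod c < c := Int.emod_lt_of_pos _ hc
      have hjm0 : 0 ≤ (jn : Int).emod c := Int.emod_nonneg _ (by omega)
      by_cases hrm : (jn : Int).emod c = ((ρ : Nat) : Int)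
      · rw [if_pos ⟨hrm, hcover jn hjn'⟩, if_pos (by omega)]
      · rw [if_neg (fun hco => hrm hco.1), hv jn hjn']
        by_cases hlt2 : (jn : Int).emod c < ((ρ : Nat) : Int)
        · rw [if_pos hlt2, if_pos (by omega)]
        · rw [if_neg hlt2, if_neg (by omega)]
    have hcast : ((ρ + 1 : Nat) : Int) = ((ρ : Nat) : Int) + 1 := by push_cast; ring
    obtain ⟨isize, ival⟩ := ihd (ρ + 1) (pvR x c ways new ((ρ : Nat) : Int))
      (by rw [hcast]; omega) (by rw [hcast]; omega) hsz' hv'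
    rw [hcast] at isize ival
    refine ⟨by rw [isize, hsz', hsz], ?_⟩
    intro jn hjn
    exact ival jn (by omega)

theorem outerB_fold (x : Int) (C : List Int) (n : Int) (hx : 0 ≤ x)
    (hn : n ≤ (C.length : Int)) (hpos : ∀ c ∈ C.take n.toNat, 0 < c) :
    ∀ (m : Nat) (ways : Array Int), (m : Int) ≤ n → (ways.size : Int) = x + 1 →
      (∀ jn : Nat, jn < ways.size → ways.getD jn 0 = bcount [] (jn : Int)) →
      (((PySem.List.pyRange 0 (m : Int) 1).foldl (pvO x C) ways).size = ways.size) ∧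
      ∀ jn : Nat, jn < ways.size →
        ((PySem.List.pyRange 0 (m : Int) 1).foldl (pvO x C) ways).getD jn 0 =
          bcount ((C.take m).reverse) (jn : Int) := by
  intro m
  induction m with
  | zero =>
    intro ways hm hsize hval
    rw [show ((0:Nat):Int) = 0 by rfl, PySem.List.pyRange_one_eq_nil (le_refl 0)]
    exact ⟨rfl, fun jn hjn => by simpa using hval jn hjn⟩
  | succ m ih =>
    intro ways hm hsize hval
    have hm' : (m : Int) ≤ n := by push_cast at hm; omega
    have hmlen : m < C.length := by push_cast at hm; omega
    obtain ⟨ihlen, ihval⟩ := ih ways hm' hsize hval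
    have hsplit : PySem.List.pyRange 0 ((m+1 : Nat) : Int) 1
        = PySem.List.pyRange 0 (m : Int) 1 ++ [(m : Int)] := by
      rw [show ((m+1 : Nat) : Int) = (m : Int) + 1 by push_cast; ring]
      exact PySem.List.pyRange_one_succ_right (by positivity)
    rw [hsplit, List.foldl_append]
    set dpP := (PySem.List.pyRange 0 (m : Int) 1).foldl (pvO x C) ways with hdpP
    simp only [List.foldl_cons, List.foldl_nil]
    rw [pvO]
    have hcget : PySem.List.pyGetD C (m : Int) 0 = C[m] := by
      rw [PySem.List.pyGetD_natCast, List.getD_eq_getElem C 0 hmlen]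
    have hcmem : C[m] ∈ C.take n.toNat := by
      have hmn : m < n.toNat := by omega
      have : (C.take n.toNat)[m]'(by simpa [List.length_take] using lt_min hmn hmlen) = C[m] :=
        List.getElem_take
      rw [← this]
      exact List.getElem_mem _
    have hcpos : 0 < C[m] := hpos _ hcmem
    have htake : (C.take (m+1)).reverse = C[m] :: (C.take m).reverse := by
      rw [List.take_add_one, List.getElem?_eq_getElem hmlen]
      simp
    rw [hcget, htake]
    have hdpPsize : (dpP.size : Int) = x + 1 := by rw [ihlen]; exact hsize
    have hnew0size : (Array.replicate (x + 1).toNat (0:Int)).size = dpP.size := by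
      rw [Array.size_replicate]; omega
    have hnew0val : ∀ jn : Nat, jn < (Array.replicate (x + 1).toNat (0:Int)).size →
        (Array.replicate (x + 1).toNat (0:Int)).getD jn 0 =
          if (jn : Int).emod C[m] < (((0:Nat) : Nat) : Int) then bcount (C[m] :: (C.take m).reverse) (jn : Int) else 0 := by
      intro jn hjn
      rw [if_neg (by
        rw [Nat.cast_zero]
        exact fun h => absurd h (not_lt.mpr (Int.emod_nonneg _ (by omega))))]
      rw [Array.getD_eq_getD_getElem?, Array.getElem?_replicate,
        if_pos (by rw [Array.size_replicate] at hjn; omega)]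
      rfl
    obtain ⟨rsize, rval⟩ := row_fold x C[m] ((C.take m).reverse) dpP hcpos hx hdpPsize
      (fun jn hjn => ihval jn (by omega)) 0 (Array.replicate (x + 1).toNat 0)
      (by rw [Nat.cast_zero]; omega) hnew0size hnew0val
    rw [Nat.cast_zero] at rsize rval
    refine ⟨by rw [rsize, Array.size_replicate]; omega, ?_⟩
    intro jn hjn
    rw [rval jn (by omega)]
    have hm0 : 0 ≤ (jn : Int).emod C[m] := Int.emod_nonneg _ (by omega)
    have hml : (jn : Int).emod C[m] < C[m] := Int.emod_lt_of_pos _ hcpos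
    rw [if_pos ?_]
    by_cases hjc : (jn : Int) < C[m]
    · have := emod_small ((jn : Nat) : Int) C[m] (by positivity) hjc
      omega
    · omega

theorem final (n : Int) (x : Int) (C : List Int)
    (hn : n ≤ (C.length : Int)) (hx : 0 ≤ x) (hpos : ∀ c ∈ C.take n.toNat, 0 < c) :
    solve n x C = solve_alt n x C := by
  rw [solve, solve_alt]
  set dp0 : Array Int := Array.replicate (x + 1).toNat 0 with hdp0
  set dp1 := dp0.setIfInBounds 0 1 with hdp1
  have hlen0 : dp0.size = (x + 1).toNat := Array.size_replicate
  have hlen1 : (dp1.size : Int) = x + 1 := by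
    rw [hdp1, Array.size_setIfInBounds, hlen0]; omega
  have hdp1val : ∀ jn : Nat, jn < dp1.size → dp1.getD jn 0 = bcount [] (jn : Int) := by
    intro jn hjn
    rw [hdp1, getD_setIfInBounds dp0 0 jn 1 0 (by omega)]
    rw [bcount]
    by_cases h0 : jn = 0
    · subst h0; norm_num
    · rw [if_neg h0, if_neg (by exact_mod_cast h0)]
      rw [hdp0, Array.getD_eq_getD_getElem?, Array.getElem?_replicate, if_pos (by omega)]
      rfl
  set w0 : Array Int := (1 :: List.replicate x.toNat 0).toArray with hw0
  have hw0size : (w0.size : Int) = x + 1 := by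
    rw [hw0, List.size_toArray, List.length_cons, List.length_replicate]; omega
  have hw0val : ∀ jn : Nat, jn < w0.size → w0.getD jn 0 = bcount [] (jn : Int) := by
    intro jn hjn
    rw [hw0, Array.getD_eq_getD_getElem?, List.getElem?_toArray, bcount]
    cases jn with
    | zero => norm_num
    | succ k =>
      rw [List.getElem?_cons_succ, if_neg (by exact_mod_cast Nat.succ_ne_zero k)]
      rw [List.getElem?_replicate]
      rw [if_pos (by rw [hw0, List.size_toArray, List.length_cons, List.length_replicate] at hjn; omega)]
      rfl
  have hxcast : ((x.toNat : Nat) : Int) = x := Int.toNat_of_nonneg hx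
  by_cases hn0 : n ≤ 0
  · rw [PySem.List.pyRange_one_eq_nil hn0]
    simp only [List.foldl_nil]
    have hvA := hdp1val x.toNat (by omega)
    have hvB := hw0val x.toNat (by omega)
    rw [hxcast] at hvA hvB
    rw [hvA, hvB]
  · rw [show (PySem.List.pyRange 0 n 1) = PySem.List.pyRange 0 ((n.toNat : Nat) : Int) 1 by
      rw [Int.toNat_of_nonneg (by omega)]]
    obtain ⟨-, fval⟩ := outer_fold x C n hn hpos n.toNat dp1 (by omega) hlen1 hdp1val
    obtain ⟨-, gval⟩ := outerB_fold x C n hx hn hpos n.toNat w0 (by omega) hw0size hw0val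
    have hvA := fval x.toNat (by omega)
    have hvB := gval x.toNat (by omega)
    rw [hxcast] at hvA hvB
    rw [hvA, hvB]

-- ===== VERDICT (by name: the statement is the Claim_ definition above) =====
theorem solve_spec : Claim_equal_solve := by
  intro n x C _ hpre
  obtain ⟨hn, hx, hpos⟩ := hpre
  unfold Spec_solve
  exact final n x C hn hx hpos
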